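-- pv_equiv track=rewrite | github.com/vincedulicz/oct_hsz_python_2024 | 05_alkalom_10_28/orai_feladat.py | kurzuskodot_csoportosit
-- ===== SOURCE A (Python) =====
-- def kurzuskodot_csoportosit(kurzuskodok):
--     if kurzuskodok == "":                   # Ha a paraméter az üres string, akkor egy üres dictionary-vel térünk vissza
--         return {}
--
--     kurzuskod_lista = kurzuskodok.split(";")    # A pontosvesszővel elválasztott kurzuskódokat eltároljuk egy listában
--     eredmeny = {"infos": [], "matekos": [], "szabval": []}  # Kitöltjük kezdőértékekkel az eredmény dictionary-t
--
--     for kurzuskod in kurzuskod_lista:       # Minden kurzuskódot a megfelelő kulcshoz tartozó listába szúrunk be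
--         if kurzuskod.startswith("I"):       # Az `I` betűvel kezdődő kurzuskódok az infós tárgyakhoz tartoznak
--             eredmeny["infos"].append(kurzuskod)
--         elif kurzuskod.startswith("M"):     # Az `M` betűvel kezdődő kurzuskódok a matekos tárgyakhoz tartoznak
--             eredmeny["matekos"].append(kurzuskod)
--         elif kurzuskod.startswith("X"):     # Az `X` betűvel kezdődő kurzuskódok a szabválokhoz tartoznak
--             eredmeny["szabval"].append(kurzuskod)
--
--     return eredmeny
-- ===== SOURCE B (Python) =====
-- def kurzuskodot_csoportosit(kurzuskodok):
--     if kurzuskodok == "":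
--         return {}
--     infos, matekos, szabval = [], [], []
--     token = ""
--     for ch in kurzuskodok + ";":
--         if ch == ";":
--             if token[:1] == "I":
--                 infos.append(token)
--             elif token[:1] == "M":
--                 matekos.append(token)
--             elif token[:1] == "X":
--                 szabval.append(token)
--             token = ""
--         else:
--             token += ch
--     return {"infos": infos, "matekos": matekos, "szabval": szabval}
-- ===== Notes on version B (the rewrite author's own statement) =====
-- stated objective: alternative
-- what changed: Replaces split-then-bucket-by-prefix with a single manual character-level tokenizer: one pass over the characters of the string (with a sentinel ';' appended), accumulating the current token and dispatching it into one of three plain list accumulators at each separator, no split() and no dict mutation by key.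
import Mathlib
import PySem

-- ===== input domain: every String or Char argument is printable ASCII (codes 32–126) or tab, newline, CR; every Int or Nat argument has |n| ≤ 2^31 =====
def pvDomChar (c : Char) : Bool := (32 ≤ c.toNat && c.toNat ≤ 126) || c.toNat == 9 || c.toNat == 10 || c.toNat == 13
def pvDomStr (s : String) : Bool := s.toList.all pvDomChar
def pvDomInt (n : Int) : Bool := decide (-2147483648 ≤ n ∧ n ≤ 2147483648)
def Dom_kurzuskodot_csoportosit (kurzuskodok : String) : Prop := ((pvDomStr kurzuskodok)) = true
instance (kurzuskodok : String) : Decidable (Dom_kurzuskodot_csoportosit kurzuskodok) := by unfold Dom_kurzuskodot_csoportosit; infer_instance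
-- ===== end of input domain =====

-- B replaces split-then-bucket-by-prefix with a single manual character-level tokenizer (one
-- pass over the characters with a sentinel ';', three plain list accumulators); same cost,
-- genuinely different algorithm structure.

-- ===== PORT A =====
def kurzuskodot_csoportosit (kurzuskodok : String) : List (String × List String) :=
  if kurzuskodok = "" then []
  else
    let kurzuskod_lista := (PySem.Str.split? kurzuskodok ";").getD []
    let eredmeny : PySem.Dict String (List String) :=
      PySem.Dict.ofList [("infos", []), ("matekos", []), ("szabval", [])]
    let eredmeny := kurzuskod_lista.foldl (fun d kurzuskod =>
      if PySem.Str.startswith kurzuskod "I" then d.modify "infos" [] (· ++ [kurzuskod])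
      else if PySem.Str.startswith kurzuskod "M" then d.modify "matekos" [] (· ++ [kurzuskod])
      else if PySem.Str.startswith kurzuskod "X" then d.modify "szabval" [] (· ++ [kurzuskod])
      else d) eredmeny
    eredmeny.items

-- ===== PORT B =====
-- B's loop state: (infos, matekos, szabval, token); one step per character of kurzuskodok + ";".
def pvBStep (st : List String × List String × List String × List Char) (ch : Char) :
    List String × List String × List String × List Char :=
  let (infos, matekos, szabval, token) := st
  if ch = ';' then
    -- token[:1] == "I" etc., ported with the Python slice
    if PySem.List.slice token none (some (1 : Int)) = ['I'] then
      (infos ++ [String.ofList token], matekos, szabval, [])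
    else if PySem.List.slice token none (some (1 : Int)) = ['M'] then
      (infos, matekos ++ [String.ofList token], szabval, [])
    else if PySem.List.slice token none (some (1 : Int)) = ['X'] then
      (infos, matekos, szabval ++ [String.ofList token], [])
    else (infos, matekos, szabval, [])
  else (infos, matekos, szabval, token ++ [ch])

def kurzuskodot_csoportosit_alt (kurzuskodok : String) : List (String × List String) :=
  if kurzuskodok = "" then []
  else
    let st := (kurzuskodok.toList ++ [';']).foldl pvBStep ([], [], [], [])
    [("infos", st.1), ("matekos", st.2.1), ("szabval", st.2.2.1)]

-- ===== PRECONDITION & SPEC =====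
def Spec_kurzuskodot_csoportosit (kurzuskodok : String) (out : List (String × List String)) : Prop := out = kurzuskodot_csoportosit_alt kurzuskodok
instance (kurzuskodok : String) (out : List (String × List String)) : Decidable (Spec_kurzuskodot_csoportosit kurzuskodok out) := by unfold Spec_kurzuskodot_csoportosit; infer_instance

-- ===== CLAIM (what is proved, stated in full; the proofs are below) =====
def Claim_equal_kurzuskodot_csoportosit : Prop := ∀ (kurzuskodok : String), Dom_kurzuskodot_csoportosit kurzuskodok → Spec_kurzuskodot_csoportosit kurzuskodok (kurzuskodot_csoportosit kurzuskodok)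

-- ===== LEMMAS AND PROOFS =====

-- Reference splitter: split a char list on ';' with a pending prefix for the current token.
def pvSplit (pre : List Char) : List Char → List (List Char)
  | [] => [pre]
  | c :: rest => if c = ';' then pre :: pvSplit [] rest else pvSplit (pre ++ [c]) rest

-- splitOn.go with a single-char separator, enough fuel, computes pvSplit.
theorem pv_go_spec (fuel : Nat) : ∀ (l cur acc : List Char) (hacc : List (List Char)),
    l.length < fuel →
    PySem.Chars.splitOn.go [';'] fuel l cur (acc :: hacc) =
      (acc :: hacc).reverse ++ pvSplit cur.reverse l ∧
    PySem.Chars.splitOn.go [';'] fuel l cur [] = pvSplit cur.reverse l := by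
  induction fuel with
  | zero => intro l cur acc hacc h; omega
  | succ fuel ih =>
    intro l cur acc hacc h
    cases l with
    | nil => simp [PySem.Chars.splitOn.go, pvSplit]
    | cons c rest =>
      simp only [PySem.Chars.splitOn.go]
      by_cases hc : c = ';'
      · have hpre : List.isPrefixOf [';'] (c :: rest) = true := by
          simp [List.isPrefixOf, hc]
        simp only [hc]
        have h1 := (ih rest [] cur.reverse (acc :: hacc) (by simpa using Nat.lt_of_succ_lt_succ h)).1
        have h2 := (ih rest [] cur.reverse [] (by simpa using Nat.lt_of_succ_lt_succ h)).1
        constructor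
        · simp only [List.length_singleton, List.drop_one, List.tail_cons] at h1 ⊢
          rw [h1]
          simp [pvSplit]
        · simp only [List.length_singleton, List.drop_one, List.tail_cons] at h2 ⊢
          rw [h2]
          simp [pvSplit]
      · have hpre : List.isPrefixOf [';'] (c :: rest) = false := by
          simp [List.isPrefixOf]; exact fun e => hc e.symm
        simp only [hpre, Bool.false_eq_true, if_false]
        have h1 := (ih rest (c :: cur) acc hacc (by simpa using Nat.lt_of_succ_lt_succ h)).1
        have h2 := (ih rest (c :: cur) acc hacc (by simpa using Nat.lt_of_succ_lt_succ h)).2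
        refine ⟨?_, ?_⟩
        · rw [h1]; simp [pvSplit, hc]
        · rw [h2]; simp [pvSplit, hc]

theorem pv_splitOn_semi (s : List Char) :
    PySem.Chars.splitOn s [';'] = pvSplit [] s := by
  have := (pv_go_spec (s.length + 1) s [] [] [] (by omega)).2
  simpa [PySem.Chars.splitOn] using this

-- single-char startswith is the "take 1" test
theorem pv_sw_take (t : List Char) (c : Char) :
    PySem.Chars.startswith t [c] = decide (t.take 1 = [c]) := by
  cases t <;> simp [PySem.Chars.startswith, List.isPrefixOf, eq_comm, Bool.beq_eq_decide_eq]

-- token[:1] is take 1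
theorem pv_slice_one (tok : List Char) :
    PySem.List.slice tok none (some (1 : Int)) = tok.take 1 := by
  simpa using PySem.List.slice_to_natCast tok 1

-- B's fold invariant: from an arbitrary state it appends the classified tokens of
-- pvSplit token cs (the tokens of cs with the pending token prefixed).
theorem pv_b_inv (cs : List Char) : ∀ (i m x : List String) (tok : List Char),
    (cs ++ [';']).foldl pvBStep (i, m, x, tok) =
      (i ++ ((pvSplit tok cs).filter (fun t => t.take 1 = [('I' : Char)])).map String.ofList,
       m ++ ((pvSplit tok cs).filter (fun t => t.take 1 = [('M' : Char)])).map String.ofList,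
       x ++ ((pvSplit tok cs).filter (fun t => t.take 1 = [('X' : Char)])).map String.ofList,
       ([] : List Char)) := by
  induction cs with
  | nil =>
    intro i m x tok
    simp only [List.nil_append, List.foldl_cons, List.foldl_nil, pvBStep, pvSplit, reduceIte]
    rw [pv_slice_one]
    by_cases hI : tok.take 1 = [('I' : Char)] <;>
      by_cases hM : tok.take 1 = [('M' : Char)] <;>
      by_cases hX : tok.take 1 = [('X' : Char)] <;>
      simp_all [List.filter]
  | cons c rest ih =>
    intro i m x tok
    simp only [List.cons_append, List.foldl_cons]
    by_cases hc : c = ';'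
    · subst hc
      simp only [pvBStep, reduceIte]
      rw [pv_slice_one]
      simp only [pvSplit, reduceIte]
      by_cases hI : tok.take 1 = [('I' : Char)]
      · rw [if_pos hI, ih]
        simp [hI]
      · by_cases hM : tok.take 1 = [('M' : Char)]
        · rw [if_neg hI, if_pos hM, ih]
          simp [hI, hM]
        · by_cases hX : tok.take 1 = [('X' : Char)]
          · rw [if_neg hI, if_neg hM, if_pos hX, ih]
            simp [hI, hM, hX]
          · rw [if_neg hI, if_neg hM, if_neg hX, ih]
            simp [hI, hM, hX]
    · simp only [pvBStep, if_neg hc, ih]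
      simp [pvSplit, hc]

-- ===== A-side lemmas (dict fold → three filters) =====
theorem pv_sw_excl (k : List Char) (c c' : Char) (h : c ≠ c')
    (hc : PySem.Chars.startswith k [c] = true) :
    PySem.Chars.startswith k [c'] = false := by
  rcases k with _ | ⟨x, xs⟩ <;> simp_all [PySem.Chars.startswith, List.isPrefixOf]
  exact fun e => h e.symm

theorem pv_modify_infos (a b c v : List String) :
    (PySem.Dict.mk [("infos", a), ("matekos", b), ("szabval", c)]).modify "infos" [] (· ++ v)
    = PySem.Dict.mk [("infos", a ++ v), ("matekos", b), ("szabval", c)] := by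
  apply PySem.Dict.ext
  simp [PySem.Dict.modify, PySem.Dict.contains, PySem.Dict.getD, PySem.Dict.get?,
    PySem.Dict.insert]

theorem pv_modify_matekos (a b c v : List String) :
    (PySem.Dict.mk [("infos", a), ("matekos", b), ("szabval", c)]).modify "matekos" [] (· ++ v)
    = PySem.Dict.mk [("infos", a), ("matekos", b ++ v), ("szabval", c)] := by
  apply PySem.Dict.ext
  simp [PySem.Dict.modify, PySem.Dict.contains, PySem.Dict.getD, PySem.Dict.get?,
    PySem.Dict.insert]

theorem pv_modify_szabval (a b c v : List String) :
    (PySem.Dict.mk [("infos", a), ("matekos", b), ("szabval", c)]).modify "szabval" [] (· ++ v)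
    = PySem.Dict.mk [("infos", a), ("matekos", b), ("szabval", c ++ v)] := by
  apply PySem.Dict.ext
  simp [PySem.Dict.modify, PySem.Dict.contains, PySem.Dict.getD, PySem.Dict.get?,
    PySem.Dict.insert]

theorem pv_fold_inv (l : List String) (a b c : List String) :
    (l.foldl (fun d kurzuskod =>
      if PySem.Str.startswith kurzuskod "I" then d.modify "infos" [] (· ++ [kurzuskod])
      else if PySem.Str.startswith kurzuskod "M" then d.modify "matekos" [] (· ++ [kurzuskod])
      else if PySem.Str.startswith kurzuskod "X" then d.modify "szabval" [] (· ++ [kurzuskod])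
      else d)
      (PySem.Dict.mk [("infos", a), ("matekos", b), ("szabval", c)])).items
    = [("infos",   a ++ l.filter (fun k => PySem.Str.startswith k "I")),
       ("matekos", b ++ l.filter (fun k => PySem.Str.startswith k "M")),
       ("szabval", c ++ l.filter (fun k => PySem.Str.startswith k "X"))] := by
  induction l generalizing a b c with
  | nil => simp
  | cons k rest ih =>
    rw [List.foldl_cons]
    by_cases hI : PySem.Chars.startswith k.toList ['I'] = true
    · have hM := pv_sw_excl k.toList 'I' 'M' (by decide) hI
      have hX := pv_sw_excl k.toList 'I' 'X' (by decide) hI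
      rw [if_pos (by simp [hI]), pv_modify_infos, ih]
      simp [hI, hM, hX]
    · by_cases hM : PySem.Chars.startswith k.toList ['M'] = true
      · have hX := pv_sw_excl k.toList 'M' 'X' (by decide) hM
        rw [if_neg (by simp [hI]), if_pos (by simp [hM]), pv_modify_matekos, ih]
        simp [hI, hM, hX]
      · by_cases hX : PySem.Chars.startswith k.toList ['X'] = true
        · rw [if_neg (by simp [hI]), if_neg (by simp [hM]), if_pos (by simp [hX]),
            pv_modify_szabval, ih]
          simp [hI, hM, hX]
        · rw [if_neg (by simp [hI]), if_neg (by simp [hM]), if_neg (by simp [hX]), ih]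
          simp [hI, hM, hX]

-- A's filter over the split strings equals B's bucket over the char tokens.
theorem pv_filter_bridge (lista : List String) (S : String) (c : Char) (hS : S.toList = [c]) :
    lista.filter (fun k => PySem.Str.startswith k S)
    = ((lista.map String.toList).filter (fun t => t.take 1 = [c])).map String.ofList := by
  induction lista with
  | nil => rfl
  | cons k rest ih =>
    simp only [List.map_cons, List.filter_cons]
    have hk : PySem.Str.startswith k S = decide (k.toList.take 1 = [c]) := by
      simp [PySem.Str.startswith, hS, pv_sw_take]
    rw [hk]
    by_cases h : k.toList.take 1 = [c]
    · rw [if_pos (by simp [h]), ih]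
      simp [h]
    · rw [if_neg (by simp [h]), ih]
      simp [h]

-- ===== VERDICT (by name: the statement is the Claim_ definition above) =====
theorem kurzuskodot_csoportosit_spec : Claim_equal_kurzuskodot_csoportosit := by
  intro s _
  unfold Spec_kurzuskodot_csoportosit kurzuskodot_csoportosit kurzuskodot_csoportosit_alt
  by_cases h : s = ""
  · simp [h]
  · simp only [h, if_false]
    rw [pv_b_inv s.toList [] [] [] []]
    have hsplit : ((PySem.Str.split? s ";").getD []).map String.toList = pvSplit [] s.toList := by
      have hb := PySem.Str.split?_map s ";"
      rw [show (";" : String).toList = [';'] from rfl] at hb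
      rw [PySem.Chars.split?] at hb
      simp only [List.isEmpty_cons] at hb
      rw [pv_splitOn_semi] at hb
      cases hs : PySem.Str.split? s ";" with
      | none => rw [hs] at hb; simp at hb
      | some l => rw [hs] at hb; simpa using hb
    rw [show (PySem.Dict.ofList [("infos", ([] : List String)), ("matekos", []), ("szabval", [])])
          = PySem.Dict.mk [("infos", []), ("matekos", []), ("szabval", [])] from rfl,
        pv_fold_inv _ [] [] [],
        pv_filter_bridge _ "I" 'I' rfl, pv_filter_bridge _ "M" 'M' rfl,
        pv_filter_bridge _ "X" 'X' rfl, hsplit]
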